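-- pv_equiv track=rewrite | github.com/wpenistone/Ford-Dialogue-Editor | FordDialogueEditor.py | count_crossings_between_nodes
-- ===== SOURCE A (Python) =====
-- from typing import List, Dict, Optional, Tuple, Any, Union, Set
--
-- def count_crossings_between_nodes(
--     u: str,
--     v: str,
--     nodes_at_level: Dict[int, List[str]],
--     node_order_indices: Dict[str, int],
--     adj_or_rev_adj: Dict[str, List[str]],
--     target_layer_idx: int,
-- ) -> int:
--     crossing_count = 0
--     target_layer_nodes = nodes_at_level.get(target_layer_idx, [])
--     neighbors_u = [
--         n
--         for n in adj_or_rev_adj.get(u, [])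
--         if n in node_order_indices and n in target_layer_nodes
--     ]
--     neighbors_v = [
--         n
--         for n in adj_or_rev_adj.get(v, [])
--         if n in node_order_indices and n in target_layer_nodes
--     ]
--     if not neighbors_u or not neighbors_v:
--         return 0
--     indices_u = [node_order_indices[n] for n in neighbors_u]
--     indices_v = [node_order_indices[n] for n in neighbors_v]
--     for idx_u in indices_u:
--         for idx_v in indices_v:
--             if idx_u > idx_v:
--                 crossing_count += 1
--     return crossing_count
-- ===== SOURCE B (Python) =====
-- def count_crossings_between_nodes(u, v, nodes_at_level, node_order_indices, adj_or_rev_adj, target_layer_idx):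
--     layer = set(nodes_at_level.get(target_layer_idx, []))
--     idx_u = sorted(node_order_indices[n] for n in adj_or_rev_adj.get(u, [])
--                    if n in node_order_indices and n in layer)
--     idx_v = sorted(node_order_indices[n] for n in adj_or_rev_adj.get(v, [])
--                    if n in node_order_indices and n in layer)
--     total = 0
--     j = 0
--     for x in idx_u:
--         while j < len(idx_v) and idx_v[j] < x:
--             j += 1
--         total += j
--     return total
-- ===== Notes on version B (the rewrite author's own statement) =====
-- stated objective: alternative
-- what changed: Replaces the nested all-pairs comparison over indices_u x indices_v by sorting both index lists and counting crossings with a single two-pointer merge scan (plus a set for the layer-membership test).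
import Mathlib
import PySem

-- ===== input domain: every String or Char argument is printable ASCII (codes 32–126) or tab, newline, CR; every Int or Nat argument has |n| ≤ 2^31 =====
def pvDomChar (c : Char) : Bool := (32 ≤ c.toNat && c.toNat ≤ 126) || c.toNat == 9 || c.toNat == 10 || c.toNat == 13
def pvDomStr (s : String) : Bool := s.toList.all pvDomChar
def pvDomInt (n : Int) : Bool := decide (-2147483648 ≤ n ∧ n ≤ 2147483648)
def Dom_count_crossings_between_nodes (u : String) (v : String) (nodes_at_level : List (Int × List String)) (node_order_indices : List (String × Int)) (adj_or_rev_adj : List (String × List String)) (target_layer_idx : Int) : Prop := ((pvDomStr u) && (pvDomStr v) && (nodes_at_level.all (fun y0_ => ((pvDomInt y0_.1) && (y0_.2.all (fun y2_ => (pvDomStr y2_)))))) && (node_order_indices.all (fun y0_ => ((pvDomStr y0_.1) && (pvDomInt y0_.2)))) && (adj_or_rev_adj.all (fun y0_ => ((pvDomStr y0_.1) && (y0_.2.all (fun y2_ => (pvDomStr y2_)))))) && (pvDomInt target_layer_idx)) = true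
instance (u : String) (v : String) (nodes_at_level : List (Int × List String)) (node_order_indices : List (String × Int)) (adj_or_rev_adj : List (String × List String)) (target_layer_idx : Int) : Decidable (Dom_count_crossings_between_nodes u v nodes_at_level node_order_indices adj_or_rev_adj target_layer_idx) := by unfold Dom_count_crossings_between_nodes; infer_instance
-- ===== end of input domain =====

-- B replaces A's nested all-pairs scan by sorting both index lists and counting crossings with a
-- single two-pointer merge scan (objective: alternative algorithm).

-- ===== PORT A =====
def count_crossings_between_nodes (u : String) (v : String) (nodes_at_level : List (Int × List String)) (node_order_indices : List (String × Int)) (adj_or_rev_adj : List (String × List String)) (target_layer_idx : Int) : Int :=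
  let target_layer_nodes := (PySem.Dict.mk nodes_at_level).getD target_layer_idx []
  let neighbors_u := ((PySem.Dict.mk adj_or_rev_adj).getD u []).filter
    (fun n => (PySem.Dict.mk node_order_indices).contains n && target_layer_nodes.contains n)
  let neighbors_v := ((PySem.Dict.mk adj_or_rev_adj).getD v []).filter
    (fun n => (PySem.Dict.mk node_order_indices).contains n && target_layer_nodes.contains n)
  if neighbors_u.isEmpty || neighbors_v.isEmpty then 0
  else
    -- node_order_indices[n]: the filter guarantees the key is present, so get?.getD is exact
    let indices_u := neighbors_u.map (fun n => ((PySem.Dict.mk node_order_indices).get? n).getD 0)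
    let indices_v := neighbors_v.map (fun n => ((PySem.Dict.mk node_order_indices).get? n).getD 0)
    indices_u.foldl (fun acc idx_u =>
      indices_v.foldl (fun acc2 idx_v => if idx_u > idx_v then acc2 + 1 else acc2) acc) 0

-- ===== PORT B =====
-- the inner 'while j < len(idx_v) and idx_v[j] < x: j += 1' (state = remaining suffix of idx_v and j)
def pvBWhile (iv : List Int) (x : Int) (j : Int) : List Int × Int :=
  match iv with
  | [] => ([], j)
  | y :: t => if y < x then pvBWhile t x (j + 1) else (y :: t, j)

-- the outer 'for x in idx_u: … ; total += j'
def pvBLoop (iu : List Int) (iv : List Int) (j : Int) (total : Int) : Int :=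
  match iu with
  | [] => total
  | x :: rest =>
    let p := pvBWhile iv x j
    pvBLoop rest p.1 p.2 (total + p.2)

def count_crossings_between_nodes_alt (u : String) (v : String) (nodes_at_level : List (Int × List String)) (node_order_indices : List (String × Int)) (adj_or_rev_adj : List (String × List String)) (target_layer_idx : Int) : Int :=
  let layer : PySem.Set String := PySem.Set.ofList ((PySem.Dict.mk nodes_at_level).getD target_layer_idx [])
  let idx_u := PySem.List.sorted
    ((((PySem.Dict.mk adj_or_rev_adj).getD u []).filter
        (fun n => (PySem.Dict.mk node_order_indices).contains n && layer.contains n)).map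
      (fun n => ((PySem.Dict.mk node_order_indices).get? n).getD 0)) (fun x => x)
  let idx_v := PySem.List.sorted
    ((((PySem.Dict.mk adj_or_rev_adj).getD v []).filter
        (fun n => (PySem.Dict.mk node_order_indices).contains n && layer.contains n)).map
      (fun n => ((PySem.Dict.mk node_order_indices).get? n).getD 0)) (fun x => x)
  pvBLoop idx_u idx_v 0 0

-- ===== PRECONDITION & SPEC =====
def Spec_count_crossings_between_nodes (u : String) (v : String) (nodes_at_level : List (Int × List String)) (node_order_indices : List (String × Int)) (adj_or_rev_adj : List (String × List String)) (target_layer_idx : Int) (out : Int) : Prop := out = count_crossings_between_nodes_alt u v nodes_at_level node_order_indices adj_or_rev_adj target_layer_idx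
instance (u : String) (v : String) (nodes_at_level : List (Int × List String)) (node_order_indices : List (String × Int)) (adj_or_rev_adj : List (String × List String)) (target_layer_idx : Int) (out : Int) : Decidable (Spec_count_crossings_between_nodes u v nodes_at_level node_order_indices adj_or_rev_adj target_layer_idx out) := by unfold Spec_count_crossings_between_nodes; infer_instance

-- ===== CLAIM (what is proved, stated in full; the proofs are below) =====
def Claim_equal_count_crossings_between_nodes : Prop := ∀ (u : String) (v : String) (nodes_at_level : List (Int × List String)) (node_order_indices : List (String × Int)) (adj_or_rev_adj : List (String × List String)) (target_layer_idx : Int), Dom_count_crossings_between_nodes u v nodes_at_level node_order_indices adj_or_rev_adj target_layer_idx → Spec_count_crossings_between_nodes u v nodes_at_level node_order_indices adj_or_rev_adj target_layer_idx (count_crossings_between_nodes u v nodes_at_level node_order_indices adj_or_rev_adj target_layer_idx)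

-- ===== LEMMAS AND PROOFS =====

-- on a ≤-sorted list, the number of elements < x is the length of the <x prefix
lemma countP_lt_eq_takeWhile_length (x : Int) : ∀ (iv : List Int), iv.Pairwise (· ≤ ·) →
    iv.countP (fun y => decide (y < x)) = (iv.takeWhile (fun y => decide (y < x))).length := by
  intro iv h
  induction iv with
  | nil => simp
  | cons y t ih =>
    rcases List.pairwise_cons.mp h with ⟨hy, ht⟩
    by_cases hyx : y < x
    · simp [hyx, ih ht]
    · have hz : ∀ z ∈ y :: t, ¬ (z < x) := by
        intro z hz
        rcases List.mem_cons.mp hz with rfl | hmem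
        · exact hyx
        · exact fun hlt => hyx (lt_of_le_of_lt (hy z hmem) hlt)
      rw [List.takeWhile_cons]
      simp only [hyx, decide_false]
      rw [List.countP_eq_zero.mpr (by intro a ha; simpa using hz a ha)]
      simp

-- pvBWhile computes the dropWhile suffix and advances j by the takeWhile length
lemma pvBWhile_eq (x : Int) : ∀ (iv : List Int) (j : Int),
    pvBWhile iv x j = (iv.dropWhile (fun y => decide (y < x)),
                       j + ((iv.takeWhile (fun y => decide (y < x))).length : Int)) := by
  intro iv
  induction iv with
  | nil => intro j; simp [pvBWhile]
  | cons y t ih =>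
    intro j
    by_cases hyx : y < x
    · rw [pvBWhile]
      simp only [hyx, if_true, ih, List.dropWhile_cons, List.takeWhile_cons, decide_true]
      simp only [Prod.mk.injEq, List.length_cons, true_and]
      push_cast; ring
    · rw [pvBWhile]
      simp [hyx]

-- splitting the count of elements < x' (x ≤ x') at the <x prefix
lemma countP_lt_split (iv : List Int) (x x' : Int) (hxx : x ≤ x') :
    iv.countP (fun y => decide (y < x')) =
      (iv.takeWhile (fun y => decide (y < x))).length +
      (iv.dropWhile (fun y => decide (y < x))).countP (fun y => decide (y < x')) := by
  conv_lhs => rw [← List.takeWhile_append_dropWhile (p := fun y => decide (y < x)) (l := iv)]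
  rw [List.countP_append]
  congr 1
  apply List.countP_eq_length.mpr
  intro a ha
  have := List.mem_takeWhile_imp ha
  simp only [decide_eq_true_eq] at this ⊢
  exact lt_of_lt_of_le this hxx

-- the two-pointer loop on sorted lists computes the pairwise crossing sum
lemma pvBLoop_eq : ∀ (iu : List Int), iu.Pairwise (· ≤ ·) → ∀ (iv : List Int), iv.Pairwise (· ≤ ·) →
    ∀ (j total : Int),
    pvBLoop iu iv j total =
      total + (iu.map (fun x => j + (iv.countP (fun y => decide (y < x)) : Int))).sum := by
  intro iu
  induction iu with
  | nil => intro _ iv _ j total; simp [pvBLoop]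
  | cons x rest ih =>
    intro h iv hiv j total
    rcases List.pairwise_cons.mp h with ⟨hx, hrest⟩
    rw [pvBLoop]
    simp only [pvBWhile_eq]
    have hiv' : (iv.dropWhile (fun y => decide (y < x))).Pairwise (· ≤ ·) :=
      hiv.sublist (List.dropWhile_sublist _)
    rw [ih hrest _ hiv']
    rw [List.map_cons, List.sum_cons]
    have hmap : (rest.map (fun x' =>
        (j + ((iv.takeWhile (fun y => decide (y < x))).length : Int)) +
          (((iv.dropWhile (fun y => decide (y < x))).countP (fun y => decide (y < x')) : Int))))
        = rest.map (fun x' => j + (iv.countP (fun y => decide (y < x')) : Int)) := by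
      apply List.map_congr_left
      intro x' hx'
      rw [countP_lt_split iv x x' (hx x' hx')]
      push_cast
      ring
    rw [hmap]
    rw [countP_lt_eq_takeWhile_length x iv hiv]
    ring

-- A's nested loops are a sum of per-element counts
lemma nestedFold_eq (iu iv : List Int) :
    iu.foldl (fun acc idx_u =>
      iv.foldl (fun acc2 idx_v => if idx_u > idx_v then acc2 + 1 else acc2) acc) 0 =
    (iu.map (fun x => (iv.countP (fun y => decide (y < x)) : Int))).sum := by
  have hinner : ∀ (x acc : Int),
      iv.foldl (fun acc2 idx_v => if x > idx_v then acc2 + 1 else acc2) acc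
        = acc + (iv.countP (fun y => decide (y < x)) : Int) := by
    intro x acc
    exact PySem.List.foldl_ite_add_one (fun idx_v => x > idx_v) iv acc
  calc iu.foldl (fun acc idx_u =>
        iv.foldl (fun acc2 idx_v => if idx_u > idx_v then acc2 + 1 else acc2) acc) 0
      = iu.foldl (fun acc idx_u => acc + (iv.countP (fun y => decide (y < idx_u)) : Int)) 0 := by
        apply PySem.List.foldl_congr_mem
        intro acc x _
        exact hinner x acc
    _ = (iu.map (fun x => (iv.countP (fun y => decide (y < x)) : Int))).sum := by
        rw [PySem.List.foldl_add]; simp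

-- set(layer) membership agrees with list membership
lemma ofList_contains_eq (L : List String) (n : String) :
    (PySem.Set.ofList L).contains n = L.contains n := by
  rw [PySem.Set.contains_eq_listContains]
  by_cases h : n ∈ L
  · simp [h, PySem.Set.mem_ofList]
  · simp [h, PySem.Set.mem_ofList]

-- ===== VERDICT (by name: the statement is the Claim_ definition above) =====
theorem count_crossings_between_nodes_spec : Claim_equal_count_crossings_between_nodes := by
  intro u v nodes_at_level node_order_indices adj_or_rev_adj target_layer_idx _
  unfold Spec_count_crossings_between_nodes
  unfold count_crossings_between_nodes count_crossings_between_nodes_alt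
  simp only [ofList_contains_eq]
  set L := (PySem.Dict.mk nodes_at_level).getD target_layer_idx [] with hL
  set nu := ((PySem.Dict.mk adj_or_rev_adj).getD u []).filter
    (fun n => (PySem.Dict.mk node_order_indices).contains n && L.contains n) with hnu
  set nv := ((PySem.Dict.mk adj_or_rev_adj).getD v []).filter
    (fun n => (PySem.Dict.mk node_order_indices).contains n && L.contains n) with hnv
  set iu := nu.map (fun n => ((PySem.Dict.mk node_order_indices).get? n).getD 0) with hiu
  set iv := nv.map (fun n => ((PySem.Dict.mk node_order_indices).get? n).getD 0) with hiv
  have hBu : (PySem.List.sorted iu (fun x => x)).Pairwise (· ≤ ·) :=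
    PySem.List.sorted_pairwise iu (fun x => x)
  have hBv : (PySem.List.sorted iv (fun x => x)).Pairwise (· ≤ ·) :=
    PySem.List.sorted_pairwise iv (fun x => x)
  have hB : pvBLoop (PySem.List.sorted iu (fun x => x)) (PySem.List.sorted iv (fun x => x)) 0 0
      = (iu.map (fun x => (iv.countP (fun y => decide (y < x)) : Int))).sum := by
    rw [pvBLoop_eq _ hBu _ hBv 0 0]
    have hcount : ∀ x : Int,
        (PySem.List.sorted iv (fun x => x)).countP (fun y => decide (y < x))
          = iv.countP (fun y => decide (y < x)) := fun x =>
      (PySem.List.sorted_perm iv (fun x => x) false).countP_eq _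
    have hperm : ((PySem.List.sorted iu (fun x => x)).map
          (fun x => (0:Int) + (iv.countP (fun y => decide (y < x)) : Int))).sum
        = (iu.map (fun x => (0:Int) + (iv.countP (fun y => decide (y < x)) : Int))).sum :=
      List.Perm.sum_eq ((PySem.List.sorted_perm iu (fun x => x) false).map _)
    simp only [hcount, hperm]
    simp
  by_cases hue : nu.isEmpty
  · have hiu0 : iu = [] := by
      rw [hiu, List.map_eq_nil_iff]; exact List.isEmpty_iff.mp hue
    simp only [hue, Bool.true_or, if_true]
    rw [hB, hiu0]; simp
  · by_cases hve : nv.isEmpty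
    · have hiv0 : iv = [] := by
        rw [hiv, List.map_eq_nil_iff]; exact List.isEmpty_iff.mp hve
      simp only [hue, hve, Bool.or_true, if_true]
      rw [hB, hiv0]; simp
    · simp only [hue, hve, Bool.or_self]
      rw [if_neg (by simp), hB, nestedFold_eq]
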